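-- pv_equiv track=rewrite | github.com/Saadzwak/design-office | backend/app/surfaces/visual_moodboard.py | _furniture_item_key
-- ===== SOURCE A (Python) =====
-- from typing import Any, Literal
--
-- def _slug(s: str) -> str:
--     """Lowercase ASCII slug — keep [a-z0-9] + hyphens only.
--
--     Iter-30B: this is intentionally ASCII-restricted (not `.isalnum()`)
--     so it stays in lock-step with the frontend `slugifyItemKey()`
--     helper in `frontend/src/routes/MoodBoard.tsx`. Python's
--     `.isalnum()` accepts Unicode letters (`é`, `ñ`, `ç` …) but the
--     JS regex `/[a-z0-9]/` does not — divergence would silently miss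
--     item-key lookups for any client / brand name with accents.
--     Both helpers normalise non-alnum to a single `-` and strip
--     leading/trailing dashes.
--     """
--
--     if not s:
--         return ""
--     out: list[str] = []
--     last_dash = False
--     for ch in s.lower():
--         if ("a" <= ch <= "z") or ("0" <= ch <= "9"):
--             out.append(ch)
--             last_dash = False
--         elif not last_dash:
--             out.append("-")
--             last_dash = True
--     return "".join(out).strip("-")
--
-- def _furniture_item_key(item: dict[str, Any]) -> str:
--     brand = item.get("brand") or ""
--     name = item.get("name") or item.get("model") or ""
--     pid = item.get("product_id") or ""
--     if pid:
--         return f"fur:{_slug(pid)}"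
--     parts = [p for p in (_slug(brand), _slug(name)) if p]
--     return f"fur:{'-'.join(parts)}" if parts else ""
-- ===== SOURCE B (Python) =====
-- # B: _slug maps every non-[a-z0-9] char of the lowered string to a space, then uses
-- # str.split()/join to collapse runs and trim -- no manual last_dash state machine.
-- def _slug(s: str) -> str:
--     cleaned = "".join(ch if ("a" <= ch <= "z" or "0" <= ch <= "9") else " " for ch in s.lower())
--     return "-".join(cleaned.split())
--
-- def _furniture_item_key(item: dict) -> str:
--     pid = item.get("product_id") or ""
--     if pid:
--         return f"fur:{_slug(pid)}"
--     brand = item.get("brand") or ""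
--     name = item.get("name") or item.get("model") or ""
--     parts = [p for p in (_slug(brand), _slug(name)) if p]
--     return f"fur:{'-'.join(parts)}" if parts else ""
-- ===== Notes on version B (the rewrite author's own statement) =====
-- stated objective: idiomatic
-- what changed: _slug's manual last_dash state machine is replaced by mapping every non-[a-z0-9] character of the lowered string to a space and letting str.split()/'-'.join collapse runs and trim the ends; the key dispatch tests product_id first with an early return.
import Mathlib
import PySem

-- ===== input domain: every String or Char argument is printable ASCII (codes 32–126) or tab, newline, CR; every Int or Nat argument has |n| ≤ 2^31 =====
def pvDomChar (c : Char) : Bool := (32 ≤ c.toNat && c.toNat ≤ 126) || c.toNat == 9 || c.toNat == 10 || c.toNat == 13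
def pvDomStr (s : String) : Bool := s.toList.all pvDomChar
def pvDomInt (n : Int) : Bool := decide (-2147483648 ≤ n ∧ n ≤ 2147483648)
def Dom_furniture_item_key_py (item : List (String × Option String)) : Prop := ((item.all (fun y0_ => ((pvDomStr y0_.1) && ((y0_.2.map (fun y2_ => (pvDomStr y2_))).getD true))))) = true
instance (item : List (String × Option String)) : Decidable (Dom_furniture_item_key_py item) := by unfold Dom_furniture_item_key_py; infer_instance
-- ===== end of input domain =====

-- B rewrites _slug to map non-[a-z0-9] chars to spaces and use split()/join instead of a
-- manual last_dash state machine (idiomatic, same cost); return values proved equal on Dom.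


-- shared with B: the char test 'a' <= ch <= 'z' or '0' <= ch <= '9' (identical in both Pythons)
def pvOk (c : Char) : Bool := ('a' ≤ c && c ≤ 'z') || ('0' ≤ c && c ≤ '9')

-- shared with B: item.get(k) on the association-list dict (first match; stored value may be None)
def pvGet (item : List (String × Option String)) (k : String) : Option String :=
  (List.lookup k item).join

-- shared with B: Python's 'x or y' for x an Optional[str] ('' and None are falsy)
def pvOr (a : Option String) (b : String) : String :=
  match a with
  | some s => if s = "" then b else s
  | none => b

-- ===== PORT A =====
-- A's loop body: one iteration of 'for ch in s.lower()' over the state (out, last_dash)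
def pvStepA (st : List Char × Bool) (ch : Char) : List Char × Bool :=
  if pvOk ch then (st.1 ++ [ch], false)
  else if !st.2 then (st.1 ++ ['-'], true)
  else st

-- A's _slug: explicit loop appending chars with a last_dash flag, then "".join(...).strip("-")
def pvSlugA (s : String) : String :=
  if s = "" then ""
  else
    let st := (PySem.Str.lower s).toList.foldl pvStepA ([], false)
    String.ofList (PySem.Chars.stripChars st.1 ['-'])

def furniture_item_key_py (item : List (String × Option String)) : String :=
  let brand := pvOr (pvGet item "brand") ""
  let name := pvOr (pvGet item "name") (pvOr (pvGet item "model") "")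
  let pid := pvOr (pvGet item "product_id") ""
  if pid ≠ "" then String.ofList ("fur:".toList ++ (pvSlugA pid).toList)
  else
    let parts := ([pvSlugA brand, pvSlugA name]).filter (fun p => p ≠ "")
    if parts ≠ [] then String.ofList ("fur:".toList ++ PySem.Chars.join ['-'] (parts.map String.toList))
    else ""

-- ===== PORT B =====
-- B's _slug: map non-alnum chars of the lowered string to ' ', then split()/join
def pvSlugB (s : String) : String :=
  let cleaned := (PySem.Str.lower s).toList.map (fun ch => if pvOk ch then ch else ' ')
  String.ofList (PySem.Chars.join ['-'] (PySem.Chars.split₀ cleaned))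

def furniture_item_key_py_alt (item : List (String × Option String)) : String :=
  let pid := pvOr (pvGet item "product_id") ""
  if pid ≠ "" then String.ofList ("fur:".toList ++ (pvSlugB pid).toList)
  else
    let brand := pvOr (pvGet item "brand") ""
    let name := pvOr (pvGet item "name") (pvOr (pvGet item "model") "")
    let parts := ([pvSlugB brand, pvSlugB name]).filter (fun p => p ≠ "")
    if parts ≠ [] then String.ofList ("fur:".toList ++ PySem.Chars.join ['-'] (parts.map String.toList))
    else ""

-- ===== PRECONDITION & SPEC =====
def Spec_furniture_item_key_py (item : List (String × Option String)) (out : String) : Prop := out = furniture_item_key_py_alt item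
instance (item : List (String × Option String)) (out : String) : Decidable (Spec_furniture_item_key_py item out) := by unfold Spec_furniture_item_key_py; infer_instance

-- ===== CLAIM (what is proved, stated in full; the proofs are below) =====
def Claim_equal_furniture_item_key_py : Prop := ∀ (item : List (String × Option String)), Dom_furniture_item_key_py item → Spec_furniture_item_key_py item (furniture_item_key_py item)

-- ===== LEMMAS AND PROOFS =====

-- A's loop body as a structural recursion on the remaining input (flag = last_dash)
def pvG : List Char → Bool → List Char
  | [], _ => []
  | c :: cs, ld =>
    if pvOk c then c :: pvG cs false
    else if ld then pvG cs true
    else '-' :: pvG cs true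

-- split₀'s run collapsing on a cleaned list, as a structural recursion (cur = reversed current word)
def pvTok : List Char → List Char → List (List Char)
  | [], cur => if cur.isEmpty then [] else [cur.reverse]
  | c :: rest, cur =>
    if pvOk c then pvTok rest (c :: cur)
    else if cur.isEmpty then pvTok rest []
    else cur.reverse :: pvTok rest []

-- trailing flag: true iff the list is nonempty and its last char is not alnum
def pvTr : List Char → Bool
  | [] => false
  | [c] => !pvOk c
  | _ :: c :: cs => pvTr (c :: cs)

lemma isspace_clean (c : Char) :
    PySem.Chars.isspace (if pvOk c then c else ' ') = !pvOk c := by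
  by_cases h : pvOk c = true
  · simp only [h, if_true, Bool.not_true]
    simp only [pvOk, Bool.or_eq_true, Bool.and_eq_true, decide_eq_true_eq, Char.le_def,
      UInt32.le_iff_toNat_le, show ('a').val.toNat = 97 from rfl, show ('z').val.toNat = 122 from rfl,
      show ('0').val.toNat = 48 from rfl, show ('9').val.toNat = 57 from rfl] at h
    unfold PySem.Chars.isspace
    simp only [Bool.or_eq_false_iff, Bool.and_eq_false_iff, decide_eq_false_iff_not, Char.toNat]
    omega
  · simp only [Bool.not_eq_true] at h
    simp [h]
    decide

lemma foldA_eq (l : List Char) (out : List Char) (ld : Bool) :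
    (l.foldl pvStepA (out, ld)).1 = out ++ pvG l ld := by
  induction l generalizing out ld with
  | nil => simp [pvG]
  | cons c cs ih =>
    by_cases h : pvOk c = true
    · simp [pvStepA, pvG, h, ih]
    · cases ld <;> simp [pvStepA, pvG, h, ih]

lemma go_tok (l : List Char) (cur : List Char) (acc : List (List Char)) :
    PySem.Chars.split₀.go (l.map (fun ch => if pvOk ch then ch else ' ')) cur acc
      = acc.reverse ++ pvTok l cur := by
  induction l generalizing cur acc with
  | nil => by_cases hc : cur.isEmpty <;> simp [PySem.Chars.split₀.go, pvTok, hc]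
  | cons c rest ih =>
    by_cases h : pvOk c = true
    · have hs : PySem.Chars.isspace c = false := by
        have := isspace_clean c; rwa [if_pos h, h, Bool.not_true] at this
      simp [PySem.Chars.split₀.go, pvTok, h, hs, ih]
    · have hs : PySem.Chars.isspace ' ' = true := by decide
      by_cases hc : cur.isEmpty <;>
        simp [PySem.Chars.split₀.go, pvTok, h, hs, hc, ih]

lemma tok_nil_of_no_ok (l : List Char) (h : l.any pvOk = false) : pvTok l [] = [] := by
  induction l with
  | nil => simp [pvTok]
  | cons c cs ih =>
    simp only [List.any_cons, Bool.or_eq_false_iff] at h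
    simp [pvTok, h.1, ih h.2]

lemma tok_ne_nil (l : List Char) (cur : List Char) (h : cur ≠ [] ∨ l.any pvOk = true) :
    pvTok l cur ≠ [] := by
  induction l generalizing cur with
  | nil =>
    rcases h with h | h
    · simp [pvTok, List.isEmpty_iff, h]
    · simp at h
  | cons c cs ih =>
    by_cases hc : pvOk c = true
    · exact by simpa [pvTok, hc] using ih (c :: cur) (Or.inl (by simp))
    · rcases h with h | h
      · simp only [pvTok, hc, if_false, List.isEmpty_iff, if_neg h, Bool.false_eq_true]
        simp
      · simp only [List.any_cons, hc, Bool.false_or] at h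
        by_cases hcur : cur.isEmpty <;>
          simp [pvTok, hc, hcur, ih _ (Or.inr h)]

lemma trF_of_no_ok (l : List Char) (h : l.any pvOk = false) (hne : l ≠ []) : pvTr l = true := by
  induction l with
  | nil => simp at hne
  | cons c cs ih =>
    simp only [List.any_cons, Bool.or_eq_false_iff] at h
    cases cs with
    | nil => simp [pvTr, h.1]
    | cons d ds => simpa [pvTr] using ih h.2 (by simp)

lemma trF_cons_ok (c : Char) (cs : List Char) (h : pvOk c = true) : pvTr (c :: cs) = pvTr cs := by
  cases cs with
  | nil => simp [pvTr, h]
  | cons d ds => simp [pvTr]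

lemma trF_cons_ne (c : Char) (cs : List Char) (h : cs ≠ []) : pvTr (c :: cs) = pvTr cs := by
  cases cs with
  | nil => simp at h
  | cons d ds => simp [pvTr]

-- the two mutually-supporting characterisations of A's loop output
lemma g_join (l : List Char) :
    (∀ cur : List Char, cur ≠ [] →
      cur.reverse ++ pvG l false
        = PySem.Chars.join ['-'] (pvTok l cur) ++ (if pvTr l then ['-'] else []))
    ∧ pvG l true
        = PySem.Chars.join ['-'] (pvTok l []) ++ (if l.any pvOk && pvTr l then ['-'] else []) := by
  induction l with
  | nil =>
    constructor
    · intro cur hcur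
      have hce : cur.isEmpty = false := by simpa using hcur
      simp [pvG, pvTok, pvTr, hce, PySem.Chars.join_singleton]
    · simp [pvG, pvTok, PySem.Chars.join_nil, pvTr]
  | cons c cs ih =>
    obtain ⟨ihA, ihB⟩ := ih
    constructor
    · intro cur hcur
      have hce : cur.isEmpty = false := by simpa using hcur
      by_cases h : pvOk c = true
      · have e1 : cur.reverse ++ pvG (c :: cs) false = (c :: cur).reverse ++ pvG cs false := by
          simp [pvG, h]
        rw [e1, ihA (c :: cur) (by simp)]
        simp [pvTok, h, trF_cons_ok c cs h]
      · have hTok : pvTok (c :: cs) cur = cur.reverse :: pvTok cs [] := by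
          simp [pvTok, h, hce]
        have hG : pvG (c :: cs) false = '-' :: pvG cs true := by simp [pvG, h]
        by_cases hany : cs.any pvOk = true
        · have hne : pvTok cs [] ≠ [] := tok_ne_nil cs [] (Or.inr hany)
          obtain ⟨t, ts', ht⟩ := List.exists_cons_of_ne_nil hne
          have hcs : cs ≠ [] := by rintro rfl; simp at hany
          rw [hTok, ht, PySem.Chars.join_cons_cons, hG, ihB, ht, trF_cons_ne c cs hcs, hany]
          simp
        · simp only [Bool.not_eq_true] at hany
          have h0 : pvTok cs [] = [] := tok_nil_of_no_ok cs hany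
          have hGB : pvG cs true = [] := by
            rw [ihB, h0, hany]; simp [PySem.Chars.join_nil]
          have hTr : pvTr (c :: cs) = true := by
            cases cs with
            | nil => simp [pvTr, h]
            | cons d ds =>
              rw [trF_cons_ne c _ (by simp)]
              exact trF_of_no_ok _ hany (by simp)
          rw [hTok, h0, hG, hGB, hTr, PySem.Chars.join_singleton]
          simp
    · by_cases h : pvOk c = true
      · have e1 : pvG (c :: cs) true = [c].reverse ++ pvG cs false := by simp [pvG, h]
        rw [e1, ihA [c] (by simp)]
        have e2 : pvTok (c :: cs) [] = pvTok cs [c] := by simp [pvTok, h]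
        rw [e2]
        simp [List.any_cons, h, trF_cons_ok c cs h]
      · have e1 : pvG (c :: cs) true = pvG cs true := by simp [pvG, h]
        have e2 : pvTok (c :: cs) [] = pvTok cs [] := by simp [pvTok, h]
        rw [e1, e2, ihB]
        cases cs with
        | nil => simp [pvTr]
        | cons d ds =>
          rw [trF_cons_ne c _ (by simp)]
          simp [List.any_cons, h]

-- tokens are nonempty and all-alnum
lemma tok_wf (l : List Char) (cur : List Char) (hcur : ∀ c ∈ cur, pvOk c = true) :
    ∀ t ∈ pvTok l cur, t ≠ [] ∧ ∀ c ∈ t, pvOk c = true := by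
  induction l generalizing cur with
  | nil =>
    intro t ht
    by_cases hce : cur.isEmpty = true
    · simp [pvTok, hce] at ht
    · simp [pvTok, hce] at ht
      subst ht
      constructor
      · simpa using (by simpa using hce : ¬ cur = [])
      · intro c hc; exact hcur c (by simpa using hc)
  | cons a rest ih =>
    intro t ht
    by_cases h : pvOk a = true
    · exact ih (a :: cur) (by intro c hc; rcases List.mem_cons.mp hc with rfl | hc; exact h; exact hcur c hc) t (by simpa [pvTok, h] using ht)
    · by_cases hce : cur.isEmpty = true
      · exact ih [] (by simp) t (by simpa [pvTok, h, hce] using ht)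
      · rw [pvTok] at ht
        simp only [h, if_false, hce, Bool.false_eq_true] at ht
        rcases List.mem_cons.mp ht with rfl | ht
        · constructor
          · simpa using (by simpa using hce : ¬ cur = [])
          · intro c hc; exact hcur c (by simpa using hc)
        · exact ih [] (by simp) t ht

lemma join_head (ts : List (List Char)) (h : ∀ t ∈ ts, t ≠ [] ∧ ∀ c ∈ t, pvOk c = true) :
    (PySem.Chars.join ['-'] ts).head? ≠ some '-' := by
  cases ts with
  | nil => simp [PySem.Chars.join_nil]
  | cons t ts' =>
    obtain ⟨ht1, ht2⟩ := h t (by simp)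
    obtain ⟨a, t', rfl⟩ := List.exists_cons_of_ne_nil ht1
    have ha : pvOk a = true := ht2 a (by simp)
    have hane : a ≠ '-' := by rintro rfl; simp [pvOk] at ha
    cases ts' with
    | nil => simpa [PySem.Chars.join_singleton] using hane
    | cons u us => simpa [PySem.Chars.join_cons_cons] using hane

lemma join_last (ts : List (List Char)) (h : ∀ t ∈ ts, t ≠ [] ∧ ∀ c ∈ t, pvOk c = true) :
    (PySem.Chars.join ['-'] ts).getLast? ≠ some '-' := by
  induction ts with
  | nil => simp [PySem.Chars.join_nil]
  | cons t ts' ih =>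
    have hih := ih (fun u hu => h u (List.mem_cons_of_mem _ hu))
    obtain ⟨ht1, ht2⟩ := h t (by simp)
    cases ts' with
    | nil =>
      rw [PySem.Chars.join_singleton]
      intro hl
      have : '-' ∈ t := List.mem_of_getLast? hl
      have := ht2 '-' this
      simp [pvOk] at this
    | cons u us =>
      rw [PySem.Chars.join_cons_cons]
      have hu : u ≠ [] := (h u (by simp)).1
      have hju : PySem.Chars.join ['-'] (u :: us) ≠ [] := by
        cases us with
        | nil => simpa [PySem.Chars.join_singleton] using hu
        | cons v vs =>
          rw [PySem.Chars.join_cons_cons]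
          intro hh
          exact hu (List.append_eq_nil_iff.mp (List.append_eq_nil_iff.mp hh).1).1
      rw [List.getLast?_append]
      cases hJ : (PySem.Chars.join ['-'] (u :: us)).getLast? with
      | none => exact absurd (List.getLast?_eq_none_iff.mp hJ) hju
      | some x =>
        rw [hJ] at hih
        simpa using hih

lemma drop_nodash (xs : List Char) (h : xs.head? ≠ some '-') :
    List.dropWhile (fun c => List.contains ['-'] c) xs = xs := by
  cases xs with
  | nil => simp
  | cons a l =>
    have ha : ¬ a = '-' := by simpa using h
    simp [ha]

lemma strip_sandwich (pre mid post : List Char)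
    (hpre : pre = [] ∨ pre = ['-']) (hpost : post = [] ∨ post = ['-'])
    (h1 : mid.head? ≠ some '-') (h2 : mid.getLast? ≠ some '-') :
    PySem.Chars.stripChars (pre ++ mid ++ post) ['-'] = mid := by
  simp only [PySem.Chars.stripChars]
  have h3 : List.dropWhile (fun c => List.contains ['-'] c) (pre ++ mid ++ post)
      = List.dropWhile (fun c => List.contains ['-'] c) (mid ++ post) := by
    rw [List.append_assoc]
    rcases hpre with rfl | rfl
    · simp
    · simp
  rw [h3]
  by_cases hmid : mid = []
  · subst hmid
    have h4 : List.dropWhile (fun c => List.contains ['-'] c) ([] ++ post) = [] := by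
      rcases hpost with rfl | rfl <;> simp
    rw [h4]
    simp
  · have h4 : List.dropWhile (fun c => List.contains ['-'] c) (mid ++ post) = mid ++ post := by
      apply drop_nodash
      rw [List.head?_append]
      cases hh : mid.head? with
      | none => exact absurd (List.head?_eq_none_iff.mp hh) hmid
      | some a =>
        rw [hh] at h1
        simpa using h1
    rw [h4, List.reverse_append]
    have h5 : List.dropWhile (fun c => List.contains ['-'] c) (post.reverse ++ mid.reverse)
        = List.dropWhile (fun c => List.contains ['-'] c) mid.reverse := by
      rcases hpost with rfl | rfl
      · simp
      · simp
    rw [h5, drop_nodash mid.reverse (by rw [List.head?_reverse]; exact h2), List.reverse_reverse]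

lemma main_list (l : List Char) :
    PySem.Chars.stripChars ((l.foldl pvStepA ([], false)).1) ['-']
      = PySem.Chars.join ['-'] (PySem.Chars.split₀ (l.map (fun ch => if pvOk ch then ch else ' '))) := by
  rw [foldA_eq]
  have hsplit : PySem.Chars.split₀ (l.map (fun ch => if pvOk ch then ch else ' ')) = pvTok l [] := by
    rw [PySem.Chars.split₀]
    simpa using go_tok l [] []
  rw [hsplit]
  cases l with
  | nil => simp [pvG, pvTok, PySem.Chars.join_nil, PySem.Chars.stripChars]
  | cons c cs =>
    by_cases h : pvOk c = true
    · have e1 : pvG (c :: cs) false = [] ++ PySem.Chars.join ['-'] (pvTok cs [c])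
          ++ (if pvTr cs then ['-'] else []) := by
        have := (g_join cs).1 [c] (by simp)
        simp only [pvG, h, if_true, List.nil_append]
        simpa using this
      have e2 : pvTok (c :: cs) [] = pvTok cs [c] := by simp [pvTok, h]
      have hwf := tok_wf cs [c] (by intro x hx; simpa using (by rintro rfl; exact h : x = c → pvOk x = true) (by simpa using hx))
      rw [List.nil_append, e1, e2]
      exact strip_sandwich [] _ _ (Or.inl rfl)
        (by split <;> simp) (join_head _ hwf) (join_last _ hwf)
    · have e1 : pvG (c :: cs) false = ['-'] ++ PySem.Chars.join ['-'] (pvTok cs [])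
          ++ (if cs.any pvOk && pvTr cs then ['-'] else []) := by
        have := (g_join cs).2
        simp only [pvG, h]
        simp [this]
      have e2 : pvTok (c :: cs) [] = pvTok cs [] := by simp [pvTok, h]
      have hwf := tok_wf cs [] (by simp)
      rw [List.nil_append, e1, e2]
      exact strip_sandwich ['-'] _ _ (Or.inr rfl)
        (by split <;> simp) (join_head _ hwf) (join_last _ hwf)

lemma slug_eq (s : String) : pvSlugA s = pvSlugB s := by
  by_cases hs : s = ""
  · subst hs; decide
  · simp only [pvSlugA, pvSlugB, if_neg hs]
    exact congrArg String.ofList (main_list _)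

-- ===== VERDICT (by name: the statement is the Claim_ definition above) =====
theorem furniture_item_key_py_spec : Claim_equal_furniture_item_key_py := by
  intro item _
  unfold Spec_furniture_item_key_py furniture_item_key_py furniture_item_key_py_alt
  simp only [slug_eq]
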